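-- pv_equiv track=rewrite | github.com/bimaoe/complex-networks | src/utils/largest_connected_component.py | lcc
-- ===== SOURCE A (Python) =====
-- def find(uf, a):
--   if uf[a] == a:
--     return a
--   uf[a] = find(uf, uf[a])
--   return uf[a]
--
-- def union(uf, a, b):
--   if a not in uf:
--     uf[a] = a
--   if b not in uf:
--     uf[b] = b
--   a = find(uf, a)
--   b = find(uf, b)
--   uf[a] = b
--
-- def lcc(graph):
--   """This function returns the largest connected component of a graph using
--     disjoint set union.
--     The input graph is considered undirected and the edges of the output
--     graph maintain the same order as the ones in the input graph.
--     The nodes are relabeled."""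
--   # Find the connected components.
--   uf = {}
--   for u in graph:
--     for v in graph[u]:
--       union(uf, u, v)
--
--   # Count the number of vertices in each connected component.
--   count = {}
--   for u in uf:
--     if find(uf, u) not in count:
--       count[find(uf, u)] = 0
--     count[find(uf, u)] += 1
--
--   # Find the size of the largest connected component and its representative.
--   mx = 0
--   mxi = -1
--   for u in count:
--     if count[u] > mx:
--       mx = count[u]
--       mxi = u
--
--   # Relabel the nodes in the largest connected component.
--   relabel = {}
--   for u in uf:
--     if find(uf, u) == mxi:
--       relabel[u] = len(relabel)
--
--   # Create a graph with the largest connected component.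
--   graphp = {}
--   for u in relabel:
--     if u in graph:
--       graphp[relabel[u]] = []
--       for v in graph[u]:
--         if v in relabel:
--           graphp[relabel[u]].append(relabel[v])
--
--   return graphp
-- ===== SOURCE B (Python) =====
-- def lcc(graph):
--   """This function returns the largest connected component of a graph.
--     The input graph is considered undirected and the edges of the output
--     graph maintain the same order as the ones in the input graph.
--     The nodes are relabeled.
--     Instead of disjoint-set-union with recursive find and path compression,
--     it keeps one flat dict comp: node -> representative of its component
--     (keys in first-appearance order) and merges two components by
--     relabeling one of them."""
--   # Find the connected components.
--   comp = {}
--   for u in graph: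
--     for v in graph[u]:
--       cu = comp.get(u)
--       if cu is None:
--         cu = comp[u] = u
--       cv = comp.get(v)
--       if cv is None:
--         cv = comp[v] = v
--       if cu != cv:
--         for x in comp:
--           if comp[x] == cu:
--             comp[x] = cv
--   # Component sizes; components appear in order of their earliest node.
--   sizes = {}
--   for u in comp:
--     sizes[comp[u]] = sizes.get(comp[u], 0) + 1
--   # Largest component (strict >, so the earliest component wins ties).
--   best, best_n = None, 0
--   for c, n in sizes.items():
--     if n > best_n:
--       best, best_n = c, n
--   # Relabel its nodes in first-appearance order.
--   relabel = {}
--   for u in comp: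
--     if comp[u] == best:
--       relabel[u] = len(relabel)
--   # Rebuild its adjacency.
--   out = {}
--   for u, lu in relabel.items():
--     if u in graph:
--       out[lu] = [relabel[v] for v in graph[u] if v in relabel]
--   return out
-- ===== Notes on version B (the rewrite author's own statement) =====
-- stated objective: simpler
-- what changed: Replaces the recursive union-find (parent forest, path compression, repeated find calls in every later pass) by a single flat dict comp mapping each node directly to its component representative, merging two components by relabeling one of them in place; all later passes then read comp directly instead of calling find.
import Mathlib
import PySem

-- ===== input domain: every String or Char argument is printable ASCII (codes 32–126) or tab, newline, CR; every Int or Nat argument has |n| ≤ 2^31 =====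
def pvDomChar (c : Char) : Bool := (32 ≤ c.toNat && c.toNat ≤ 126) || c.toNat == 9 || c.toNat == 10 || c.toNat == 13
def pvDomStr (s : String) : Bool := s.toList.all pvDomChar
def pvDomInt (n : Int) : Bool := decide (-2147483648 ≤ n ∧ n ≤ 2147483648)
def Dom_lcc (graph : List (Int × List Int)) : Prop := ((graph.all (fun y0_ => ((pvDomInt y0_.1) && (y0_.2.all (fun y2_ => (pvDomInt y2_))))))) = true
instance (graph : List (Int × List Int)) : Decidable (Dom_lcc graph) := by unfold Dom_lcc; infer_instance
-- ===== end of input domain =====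

-- B replaces A's recursive union-find (parent forest, path compression, find calls in
-- every later pass) by one flat node -> representative dict, merging by relabeling:
-- a simpler structure of the same asymptotic size (objective: simpler, not faster).

-- ===== PORT A =====
-- find(uf, a); the Nat fuel only makes the recursion structural: at every call
-- site the fuel passed (number of keys + 1) exceeds the parent-chain length.
def ufFind : Nat → PySem.Dict Int Int → Int → PySem.Dict Int Int × Int
  | 0, uf, a => (uf, a)
  | n+1, uf, a =>
    let pa := uf.getD a a          -- uf[a]; a is a key of uf at every call site
    if pa = a then (uf, a)
    else
      let fr := ufFind n uf pa     -- find(uf, uf[a])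
      let uf' := fr.1.insert a fr.2
      (uf', uf'.getD a a)          -- return uf[a]

-- 'if a not in uf: uf[a] = a'
def anode (uf : PySem.Dict Int Int) (k : Int) : PySem.Dict Int Int :=
  if uf.contains k then uf else uf.insert k k

def ufUnion (uf : PySem.Dict Int Int) (a b : Int) : PySem.Dict Int Int :=
  let uf1 := anode uf a
  let uf2 := anode uf1 b
  let fa := ufFind (uf2.keys.length + 1) uf2 a
  let fb := ufFind (fa.1.keys.length + 1) fa.1 b
  fb.1.insert fa.2 fb.2            -- uf[a'] = b'

-- body of 'for u in uf' counting loop: state = (uf, count);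
-- find(uf, u) is recomputed exactly as often as the Python does
def countStep (st : PySem.Dict Int Int × PySem.Dict Int Int) (u : Int) :
    PySem.Dict Int Int × PySem.Dict Int Int :=
  let f1 := ufFind (st.1.keys.length + 1) st.1 u
  let st2 := if st.2.contains f1.2 = false then
      let f2 := ufFind (f1.1.keys.length + 1) f1.1 u
      (f2.1, st.2.insert f2.2 0)
    else (f1.1, st.2)
  let f3 := ufFind (st2.1.keys.length + 1) st2.1 u
  (f3.1, st2.2.insert f3.2 (st2.2.getD f3.2 0 + 1))

-- body of the relabeling loop: state = (uf, relabel)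
def relStep (mxi : Int) (st : PySem.Dict Int Int × PySem.Dict Int Int) (u : Int) :
    PySem.Dict Int Int × PySem.Dict Int Int :=
  let f := ufFind (st.1.keys.length + 1) st.1 u
  if f.2 = mxi then (f.1, st.2.insert u (st.2.items.length : Int)) else (f.1, st.2)

-- body of the output loop over relabel.items
def buildStep (g : PySem.Dict Int (List Int)) (relabel : PySem.Dict Int Int)
    (gp : PySem.Dict Int (List Int)) (p : Int × Int) : PySem.Dict Int (List Int) :=
  if g.contains p.1 then
    let gp1 := gp.insert (relabel.getD p.1 0) ([] : List Int)
    (g.getD p.1 []).foldl (fun gp2 v =>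
        if relabel.contains v then
          gp2.modify (relabel.getD p.1 0) [] (fun l => l ++ [relabel.getD v 0])
        else gp2) gp1
  else gp

-- everything after the union loop, with uf the union-find built from the edges
def lccCore (g : PySem.Dict Int (List Int)) (uf : PySem.Dict Int Int) :
    List (Int × List Int) :=
  let ks := uf.keys
  let st := ks.foldl countStep (uf, PySem.Dict.empty)
  let mm := st.2.items.foldl (fun (mm : Int × Int) p => if p.2 > mm.1 then (p.2, p.1) else mm)
    (0, -1)
  let st3 := ks.foldl (relStep mm.2) (st.1, PySem.Dict.empty)
  let graphp := st3.2.items.foldl (buildStep g st3.2) PySem.Dict.empty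
  graphp.items

def lcc (graph : List (Int × List Int)) : List (Int × List Int) :=
  lccCore (PySem.Dict.mk graph)
    (graph.foldl (fun uf p => p.2.foldl (fun uf v => ufUnion uf p.1 v) uf) PySem.Dict.empty)


-- ===== PORT B =====

-- 'c = comp.get(k); if c is None: c = comp[k] = k' — returns (comp, c)
def bnode (comp : PySem.Dict Int Int) (k : Int) : PySem.Dict Int Int × Int :=
  match comp.get? k with
  | none => (comp.insert k k, k)
  | some c => (comp, c)

-- one edge (u, v): get-or-create both labels, then relabel u's class to cv
def bstep (comp : PySem.Dict Int Int) (u v : Int) : PySem.Dict Int Int :=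
  let s1 := bnode comp u
  let s2 := bnode s1.1 v
  if s1.2 ≠ s2.2 then
    s2.1.keys.foldl (fun c x => if c.getD x 0 = s1.2 then c.insert x s2.2 else c) s2.1
  else s2.1

-- everything after the merge loop, with comp the node -> representative map
def lccAltCore (g : PySem.Dict Int (List Int)) (comp : PySem.Dict Int Int) :
    List (Int × List Int) :=
  let sizes := comp.items.foldl (fun s p => s.insert p.2 (s.getD p.2 0 + 1)) PySem.Dict.empty
  let bb := sizes.items.foldl (fun (bb : Option Int × Int) p =>
      if p.2 > bb.2 then (some p.1, p.2) else bb) (none, 0)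
  let relabel := comp.items.foldl (fun rel p =>
      if some p.2 = bb.1 then rel.insert p.1 (rel.items.length : Int) else rel) PySem.Dict.empty
  let out := relabel.items.foldl (fun o p =>
      match g.get? p.1 with
      | some adj => o.insert p.2 (adj.filterMap (fun v => relabel.get? v))
      | none => o) PySem.Dict.empty
  out.items

def lcc_alt (graph : List (Int × List Int)) : List (Int × List Int) :=
  lccAltCore (PySem.Dict.mk graph)
    (graph.foldl (fun comp p => p.2.foldl (fun comp v => bstep comp p.1 v) comp) PySem.Dict.empty)

-- ===== PRECONDITION & SPEC =====
def Spec_lcc (graph : List (Int × List Int)) (out : List (Int × List Int)) : Prop := out = lcc_alt graph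
instance (graph : List (Int × List Int)) (out : List (Int × List Int)) : Decidable (Spec_lcc graph out) := by unfold Spec_lcc; infer_instance

-- ===== CLAIM (what is proved, stated in full; the proofs are below) =====
def Claim_equal_lcc : Prop := ∀ (graph : List (Int × List Int)), Dom_lcc graph → Spec_lcc graph (lcc graph)

-- ===== LEMMAS AND PROOFS =====



def par (uf : PySem.Dict Int Int) (x : Int) : Int := uf.getD x x

inductive Chain (uf : PySem.Dict Int Int) : Int → Int → List Int → Prop
  | root {a : Int} : par uf a = a → Chain uf a a [a]
  | step {a r : Int} {l : List Int} : par uf a ≠ a → Chain uf (par uf a) r l → Chain uf a r (a :: l)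

def Good (uf : PySem.Dict Int Int) (m : Int → Int) : Prop :=
  ∀ x ∈ uf.keys, ∃ l, Chain uf x (m x) l ∧ l.Nodup ∧ ∀ y ∈ l, y ∈ uf.keys

theorem chain_root_mem {uf a r l} (h : Chain uf a r l) : r ∈ l := by
  induction h with
  | root _ => simp
  | step _ _ ih => simp [ih]

theorem chain_det {uf a r₁ l₁ r₂ l₂} (h₁ : Chain uf a r₁ l₁) (h₂ : Chain uf a r₂ l₂) :
    r₁ = r₂ ∧ l₁ = l₂ := by
  induction h₁ generalizing r₂ l₂ with
  | root hp => cases h₂ with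
    | root _ => exact ⟨rfl, rfl⟩
    | step hn _ => exact absurd hp hn
  | step hn hc ih => cases h₂ with
    | root hp => exact absurd hp hn
    | step hn₂ hc₂ =>
      obtain ⟨h1, h2⟩ := ih hc₂
      exact ⟨h1, by rw [h2]⟩

theorem chain_root_par {uf a r l} (h : Chain uf a r l) : par uf r = r := by
  induction h with
  | root hp => exact hp
  | step _ _ ih => exact ih

theorem chain_congr {uf uf' : PySem.Dict Int Int} {a r l} (h : Chain uf a r l)
    (hp : ∀ y ∈ l, par uf' y = par uf y) : Chain uf' a r l := by
  induction h with
  | root hpar => exact Chain.root (by rw [hp _ (by simp), hpar])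
  | @step a r l hn hc ih =>
    have hpa : par uf' a = par uf a := hp a (by simp)
    refine Chain.step (by rw [hpa]; exact hn) ?_
    rw [hpa]; exact ih fun y hy => hp y (by simp [hy])

theorem chain_length_le {l : List Int} {ks : List Int} (hnd : l.Nodup) (hsub : ∀ y ∈ l, y ∈ ks) :
    l.length ≤ ks.length := by
  exact List.Subperm.length_le (List.subperm_of_subset hnd hsub)

-- m is constant along a chain, given Good
theorem chain_label {uf m} (hg : Good uf m) {a r l} (h : Chain uf a r l)
    (hsub : ∀ y ∈ l, y ∈ uf.keys) : ∀ y ∈ l, m y = r := by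
  induction h with
  | @root a hp =>
    intro y hy; simp at hy; subst hy
    obtain ⟨l', hc', _, _⟩ := hg y (hsub y (by simp))
    exact (chain_det hc' (Chain.root hp)).1
  | @step a r l hn hc ih =>
    intro y hy
    rcases List.mem_cons.1 hy with rfl | hy'
    · obtain ⟨l', hc', _, hsub'⟩ := hg y (hsub y (by simp))
      have : Chain uf y r (y :: l) := Chain.step hn hc
      exact (chain_det hc' this).1
    · exact ih (fun z hz => hsub z (by simp [hz])) y hy'

theorem good_m_mem {uf m} (hg : Good uf m) {x} (hx : x ∈ uf.keys) : m x ∈ uf.keys := by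
  obtain ⟨l, hc, _, hsub⟩ := hg x hx
  exact hsub _ (chain_root_mem hc)

theorem good_root_par {uf m} (hg : Good uf m) {x} (hx : x ∈ uf.keys) : par uf (m x) = m x := by
  obtain ⟨l, hc, _, _⟩ := hg x hx
  exact chain_root_par hc

theorem par_insert (d : PySem.Dict Int Int) (k v y : Int) :
    par (d.insert k v) y = if y = k then v else par d y := by
  simp [par, PySem.Dict.getD_insert]

-- redirecting a non-root a to the root r0 of its class (path compression step)
theorem chain_update_path {uf uf' : PySem.Dict Int Int} {a r0 : Int}
    (hpar : ∀ y, y ≠ a → par uf' y = par uf y) (hpa : par uf' a = r0)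
    (hna : par uf a ≠ a) (hr : par uf r0 = r0) :
    ∀ {x rt l}, Chain uf x rt l → l.Nodup → (a ∈ l → rt = r0) →
      ∃ l', Chain uf' x rt l' ∧ l'.Nodup ∧ ∀ y ∈ l', y ∈ l ∨ y = r0 := by
  have hra : r0 ≠ a := fun h => hna (h ▸ hr)
  have hr' : par uf' r0 = r0 := by rw [hpar _ hra]; exact hr
  intro x rt l hc
  induction hc with
  | @root x hp =>
    intro _ hmem
    rcases eq_or_ne x a with rfl | hxa
    · exact absurd hp hna
    · exact ⟨[x], Chain.root (by rw [hpar _ hxa]; exact hp), by simp, by simp⟩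
  | @step x rt l hn hcp ih =>
    intro hnd hmem
    rcases eq_or_ne x a with rfl | hxa
    · have hrt : rt = r0 := hmem (by simp)
      refine ⟨[x, r0], ?_, by simp [Ne.symm hra], by simp⟩
      rw [hrt]
      exact Chain.step (by rw [hpa]; exact hra) (by rw [hpa]; exact Chain.root hr')
    · obtain ⟨l', hc', hnd', hsub'⟩ := ih (List.Nodup.of_cons hnd)
        (fun h => hmem (by simp [h]))
      have hxl' : x ∉ l' := by
        intro hx
        rcases hsub' x hx with h | h
        · exact (List.nodup_cons.1 hnd).1 h
        · subst h; exact hn hr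
      refine ⟨x :: l', Chain.step (by rw [hpar _ hxa]; exact hn)
        (by rw [hpar _ hxa]; exact hc'), List.nodup_cons.2 ⟨hxl', hnd'⟩, ?_⟩
      intro y hy
      rcases List.mem_cons.1 hy with rfl | hy'
      · exact Or.inl (by simp)
      · rcases hsub' y hy' with h | h
        · exact Or.inl (by simp [h])
        · exact Or.inr h

-- attaching root ra under root rb (the union step)
theorem chain_update_union {uf uf' : PySem.Dict Int Int} {ra rb : Int}
    (hpar : ∀ y, y ≠ ra → par uf' y = par uf y) (hpa : par uf' ra = rb)
    (hra : par uf ra = ra) (hrb : par uf rb = rb) (hne : ra ≠ rb) :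
    ∀ {x rt l}, Chain uf x rt l → l.Nodup →
      ∃ l', Chain uf' x (if rt = ra then rb else rt) l' ∧ l'.Nodup ∧
        ∀ y ∈ l', y ∈ l ∨ y = rb := by
  have hrb' : par uf' rb = rb := by rw [hpar _ (Ne.symm hne)]; exact hrb
  intro x rt l hc
  induction hc with
  | @root x hp =>
    intro _
    rcases eq_or_ne x ra with rfl | hxa
    · refine ⟨[x, rb], ?_, by simp [hne], by simp⟩
      rw [if_pos rfl]
      exact Chain.step (by rw [hpa]; exact Ne.symm hne) (by rw [hpa]; exact Chain.root hrb')
    · refine ⟨[x], ?_, by simp, by simp⟩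
      rw [if_neg hxa]
      exact Chain.root (by rw [hpar _ hxa]; exact hp)
  | @step x rt l hn hcp ih =>
    intro hnd
    have hxa : x ≠ ra := fun h => hn (h ▸ hra)
    obtain ⟨l', hc', hnd', hsub'⟩ := ih (List.Nodup.of_cons hnd)
    have hxl' : x ∉ l' := by
      intro hx
      rcases hsub' x hx with h | h
      · exact (List.nodup_cons.1 hnd).1 h
      · subst h; exact hn hrb
    refine ⟨x :: l', Chain.step (by rw [hpar _ hxa]; exact hn)
      (by rw [hpar _ hxa]; exact hc'), List.nodup_cons.2 ⟨hxl', hnd'⟩, ?_⟩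
    intro y hy
    rcases List.mem_cons.1 hy with rfl | hy'
    · exact Or.inl (by simp)
    · rcases hsub' y hy' with h | h
      · exact Or.inl (by simp [h])
      · exact Or.inr h
theorem ufFind_spec {uf : PySem.Dict Int Int} {m : Int → Int} (hg : Good uf m)
    {a r : Int} {l : List Int} (hc : Chain uf a r l) :
    l.Nodup → (∀ y ∈ l, y ∈ uf.keys) → ∀ {fuel : Nat}, l.length ≤ fuel →
    ∃ uf', ufFind fuel uf a = (uf', r) ∧ uf'.keys = uf.keys ∧ Good uf' m := by
  induction hc with
  | @root a hp =>
    intro _ _ fuel hf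
    match fuel, hf with
    | n+1, _ =>
      refine ⟨uf, ?_, rfl, hg⟩
      show ufFind (n+1) uf a = (uf, a)
      simp only [ufFind]
      rw [if_pos (show uf.getD a a = a from hp)]
  | @step a r l hn hcp ih =>
    intro hnd hsub fuel hf
    match fuel, hf with
    | n+1, hf =>
      have ha : a ∈ uf.keys := hsub a (by simp)
      have hsub' : ∀ y ∈ l, y ∈ uf.keys := fun y hy => hsub y (by simp [hy])
      obtain ⟨uf₁, heq, hkeys, hg₁⟩ := ih (List.Nodup.of_cons hnd) hsub'
        (Nat.le_of_succ_le_succ hf)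
      have hma : m a = r := by
        refine chain_label hg (Chain.step hn hcp) hsub a (by simp)
      have hra : r ≠ a := by
        intro h
        exact (List.nodup_cons.1 hnd).1 (h ▸ chain_root_mem hcp)
      have hmem_r : r ∈ uf.keys := hma ▸ good_m_mem hg ha
      have e1 : ufFind (n+1) uf a = ((ufFind n uf (par uf a)).1.insert a (ufFind n uf (par uf a)).2,
          ((ufFind n uf (par uf a)).1.insert a (ufFind n uf (par uf a)).2).getD a a) := by
        simp only [ufFind]
        rw [if_neg (show ¬ uf.getD a a = a from hn)]
        rfl
      have hca : uf₁.contains a = true := (PySem.Dict.contains_iff_mem_keys _ _).2 (hkeys ▸ ha)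
      have hk2 : (uf₁.insert a r).keys = uf₁.keys := PySem.Dict.keys_insert_of_contains _ _ hca
      rw [e1, heq]
      simp only
      refine ⟨uf₁.insert a r, ?_, ?_, ?_⟩
      · rw [PySem.Dict.getD_insert_self]
      · rw [hk2, hkeys]
      · -- Good (uf₁.insert a r) m
        intro x hx
        rw [hk2] at hx
        obtain ⟨lx, hcx, hndx, hsubx⟩ := hg₁ x hx
        have hna1 : par uf₁ a ≠ a := by
          intro hpa
          obtain ⟨la, hca, _, _⟩ := hg₁ a (hkeys ▸ ha)
          have := (chain_det hca (Chain.root hpa)).1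
          exact hra (by rw [← hma, this])
        have hr1 : par uf₁ r = r := by
          have := good_root_par hg₁ (x := a) (hkeys ▸ ha)
          rwa [hma] at this
        obtain ⟨l', hc', hnd', hsub'2⟩ := chain_update_path
          (fun y hy => par_insert uf₁ a r y ▸ if_neg hy)
          (by rw [par_insert, if_pos rfl]) hna1 hr1 hcx hndx
          (fun hal => by
            have := chain_label hg₁ hcx hsubx a hal
            rw [← this, hma])
        refine ⟨l', hc', hnd', ?_⟩
        intro y hy
        rw [hk2]
        rcases hsub'2 y hy with h | h
        · exact hsubx y h
        · exact h ▸ (hkeys ▸ hmem_r)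

theorem ufFind_call {uf : PySem.Dict Int Int} {m : Int → Int} (hg : Good uf m)
    {a : Int} (ha : a ∈ uf.keys) :
    ∃ uf', ufFind (uf.keys.length + 1) uf a = (uf', m a) ∧ uf'.keys = uf.keys ∧ Good uf' m := by
  obtain ⟨l, hc, hnd, hsub⟩ := hg a ha
  exact ufFind_spec hg hc hnd hsub (Nat.le_succ_of_le (chain_length_le hnd hsub))
theorem good_insert_fresh {uf : PySem.Dict Int Int} {m : Int → Int} (hg : Good uf m)
    {k : Int} (hk : k ∉ uf.keys) :
    Good (uf.insert k k) (fun x => if x = k then k else m x) := by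
  intro x hx
  have hkeys : (uf.insert k k).keys = uf.keys ++ [k] :=
    PySem.Dict.keys_insert_of_not_contains _ _ (by
      by_contra h
      exact hk ((PySem.Dict.contains_iff_mem_keys _ _).1 (by simpa using h)))
  rw [hkeys] at hx
  rcases List.mem_append.1 hx with hx | hx
  · have hxk : x ≠ k := fun h => hk (h ▸ hx)
    obtain ⟨l, hc, hnd, hsub⟩ := hg x hx
    refine ⟨l, ?_, hnd, fun y hy => by rw [hkeys]; exact List.mem_append.2 (Or.inl (hsub y hy))⟩
    have : Chain (uf.insert k k) x (m x) l := chain_congr hc (fun y hy => by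
      rw [par_insert]
      exact if_neg (fun h : y = k => hk (h ▸ hsub y hy)))
    simpa [if_neg hxk] using this
  · simp at hx; subst hx
    refine ⟨[x], ?_, by simp, by simp [hkeys]⟩
    have : Chain (uf.insert x x) x x [x] := Chain.root (by rw [par_insert, if_pos rfl])
    simpa using this

theorem relabel_fold (cu cv : Int) :
    ∀ (ks : List Int) (c : PySem.Dict Int Int), ks.Nodup → (∀ x ∈ ks, x ∈ c.keys) →
    (ks.foldl (fun c x => if c.getD x 0 = cu then c.insert x cv else c) c).keys = c.keys ∧
    ∀ y, (ks.foldl (fun c x => if c.getD x 0 = cu then c.insert x cv else c) c).getD y 0 =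
      if y ∈ ks ∧ c.getD y 0 = cu then cv else c.getD y 0 := by
  intro ks
  induction ks with
  | nil => intro c _ _; exact ⟨rfl, fun y => by simp⟩
  | cons x ks ih =>
    intro c hnd hsub
    have hxc : x ∈ c.keys := hsub x (by simp)
    set c' := if c.getD x 0 = cu then c.insert x cv else c with hc'
    have hk' : c'.keys = c.keys := by
      rw [hc']; split
      · exact PySem.Dict.keys_insert_of_contains _ _ ((PySem.Dict.contains_iff_mem_keys _ _).2 hxc)
      · rfl
    have hg' : ∀ y, c'.getD y 0 = if y = x ∧ c.getD y 0 = cu then cv else c.getD y 0 := by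
      intro y
      rw [hc']; split
      · rename_i h
        rw [PySem.Dict.getD_insert]
        by_cases hyx : y = x
        · subst hyx; simp [h]
        · simp [hyx]
      · rename_i h
        by_cases hyx : y = x
        · subst hyx; simp [h]
        · simp [hyx]
    obtain ⟨ihk, ihg⟩ := ih c' (List.Nodup.of_cons hnd)
      (fun z hz => hk' ▸ hsub z (by simp [hz]))
    refine ⟨by rw [List.foldl_cons, ← hc', ihk, hk'], fun y => ?_⟩
    rw [List.foldl_cons, ← hc', ihg y, hg' y]
    by_cases hyx : y = x
    · subst hyx
      have hyks : y ∉ ks := (List.nodup_cons.1 hnd).1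
      by_cases hcu : c.getD y 0 = cu
      · simp [hyks, hcu]
      · simp [hyks, hcu]
    · simp only [if_neg (fun hh : y = x ∧ _ => hyx hh.1)]
      by_cases hyks : y ∈ ks
      · simp [hyks, hyx]
      · simp [hyks, hyx]

theorem foldl_rel {α β γ : Type} {R : α → β → Prop} {f : α → γ → α} {g : β → γ → β}
    (step : ∀ s t x, R s t → R (f s x) (g t x)) :
    ∀ (l : List γ) (s : α) (t : β), R s t → R (l.foldl f s) (l.foldl g t) := by
  intro l
  induction l with
  | nil => intro s t h; exact h
  | cons x l ih => intro s t h; exact ih _ _ (step s t x h)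
def INV (uf comp : PySem.Dict Int Int) : Prop :=
  uf.keys = comp.keys ∧ comp.keys.Nodup ∧ Good uf (fun x => comp.getD x 0)

theorem node_step {uf comp : PySem.Dict Int Int} (h : INV uf comp) (k : Int) :
    INV (anode uf k) (bnode comp k).1 ∧ k ∈ (bnode comp k).1.keys ∧
    (bnode comp k).2 = (bnode comp k).1.getD k 0 ∧
    ((bnode comp k).1.keys = comp.keys ∨ (k ∉ comp.keys ∧ (bnode comp k).1.keys = comp.keys ++ [k])) ∧
    (∀ y ∈ comp.keys, (bnode comp k).1.getD y 0 = comp.getD y 0) := by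
  obtain ⟨hkeys, hnd, hg⟩ := h
  by_cases hk : k ∈ comp.keys
  · have hcon : uf.contains k = true := (PySem.Dict.contains_iff_mem_keys _ _).2 (hkeys ▸ hk)
    have hcon' : comp.contains k = true := (PySem.Dict.contains_iff_mem_keys _ _).2 hk
    have hsome : (comp.get? k).isSome := by
      rw [← PySem.Dict.contains_eq_isSome_get?]; exact hcon'
    obtain ⟨c, hc⟩ := Option.isSome_iff_exists.1 hsome
    have hb : bnode comp k = (comp, c) := by rw [bnode, hc]
    have ha : anode uf k = uf := by rw [anode, if_pos hcon]
    rw [hb, ha]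
    exact ⟨⟨hkeys, hnd, hg⟩, hk, (PySem.Dict.getD_of_get?_eq_some _ 0 hc).symm,
      Or.inl rfl, fun y _ => rfl⟩
  · have hcon : uf.contains k = false := by
      rw [PySem.Dict.contains_eq_isSome_get?, Option.isSome_eq_false_iff,
        Option.isNone_iff_eq_none, PySem.Dict.get?_eq_none_iff_not_mem_keys]
      exact hkeys ▸ hk
    have hcon' : comp.contains k = false := by
      rw [PySem.Dict.contains_eq_isSome_get?, Option.isSome_eq_false_iff,
        Option.isNone_iff_eq_none, PySem.Dict.get?_eq_none_iff_not_mem_keys]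
      exact hk
    have hgn : comp.get? k = none := (PySem.Dict.get?_eq_none_iff_not_mem_keys _ _).2 hk
    have hb : bnode comp k = (comp.insert k k, k) := by rw [bnode, hgn]
    have ha : anode uf k = uf.insert k k := by rw [anode, if_neg (by simp [hcon])]
    have hkeys' : (comp.insert k k).keys = comp.keys ++ [k] :=
      PySem.Dict.keys_insert_of_not_contains _ _ hcon'
    have hkeysu : (uf.insert k k).keys = uf.keys ++ [k] :=
      PySem.Dict.keys_insert_of_not_contains _ _ hcon
    rw [hb, ha]
    refine ⟨⟨by rw [hkeys', hkeysu, hkeys], PySem.Dict.nodup_keys_insert _ _ _ hnd, ?_⟩,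
      by simp [hkeys'], by rw [PySem.Dict.getD_insert_self], Or.inr ⟨hk, hkeys'⟩,
      fun y hy => by
        rw [PySem.Dict.getD_insert, if_neg (fun hh : y = k => hk (hh ▸ hy))]⟩
    have hgood := good_insert_fresh hg (k := k) (hkeys ▸ hk)
    have hfun : (fun x => (comp.insert k k).getD x 0) = (fun x => if x = k then k else comp.getD x 0) := by
      funext x
      rw [PySem.Dict.getD_insert]
    rw [hfun]
    exact hgood

theorem insert_par_self {d : PySem.Dict Int Int} (hnd : d.keys.Nodup) {k : Int}
    (hk : k ∈ d.keys) (hpar : par d k = k) : d.insert k k = d := by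
  apply PySem.Dict.ext
  rw [PySem.Dict.items_insert_of_contains _ _ ((PySem.Dict.contains_iff_mem_keys _ _).2 hk)]
  have hmap : List.map (fun p => if (p.1 == k) = true then (k, k) else p) d.items
      = List.map id d.items := by
    apply List.map_congr_left
    intro p hp
    by_cases hpk : p.1 = k
    · have hgd : d.getD p.1 k = p.2 := PySem.Dict.getD_of_mem_items _ (by simpa using hp) hnd k
      have hv : p.2 = k := by
        rw [← hgd, hpk]
        exact hpar
      simp only [hpk, BEq.rfl, if_true, id]
      exact (Prod.ext_iff).2 ⟨hpk.symm, hv.symm⟩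
    · simp [hpk]
  rw [hmap, List.map_id]

theorem edge_step {uf comp : PySem.Dict Int Int} (u v : Int) (h : INV uf comp) :
    INV (ufUnion uf u v) (bstep comp u v) := by
  obtain ⟨inv1, hu1, hcu1, hk1, hv1⟩ := node_step h u
  obtain ⟨inv2, hu2, hcu2, hk2, hv2⟩ := node_step inv1 v
  obtain ⟨hkeys2, hnd2, hg2⟩ := inv2
  set uf1 := anode uf u with huf1
  set comp1 := (bnode comp u).1 with hcomp1
  set cu := (bnode comp u).2 with hcu
  set uf2 := anode uf1 v with huf2
  set comp2 := (bnode comp1 v).1 with hcomp2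
  set cv := (bnode comp1 v).2 with hcv
  set m2 : Int → Int := fun x => comp2.getD x 0 with hm2
  have humem : u ∈ comp2.keys := by
    rcases hk2 with h2 | ⟨_, h2⟩ <;> rw [h2] <;> simp [hu1]
  have hvmem : v ∈ comp2.keys := hu2
  have hcu2' : cu = m2 u := by
    rw [hcu1, hm2]
    exact (hv2 u hu1).symm
  have hcv2' : cv = m2 v := hcu2
  -- the two finds
  obtain ⟨uf3, hf3, hkeys3, hg3⟩ := ufFind_call hg2 (a := u) (hkeys2 ▸ humem)
  obtain ⟨uf4, hf4, hkeys4, hg4⟩ := ufFind_call hg3 (a := v) (hkeys3 ▸ hkeys2 ▸ hvmem)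
  have hufeq : ufUnion uf u v = uf4.insert (m2 u) (m2 v) := by
    rw [ufUnion]
    simp only [← huf1, ← huf2, hf3]
    rw [hkeys3] at hf4 ⊢
    simp only [hf4]
  have hkeys4' : uf4.keys = comp2.keys := by rw [hkeys4, hkeys3, hkeys2]
  have hpar_u : par uf4 (m2 u) = m2 u := by
    have := good_root_par hg4 (x := u) (by rw [hkeys4, hkeys3, hkeys2]; exact humem)
    exact this
  have hpar_v : par uf4 (m2 v) = m2 v := by
    have := good_root_par hg4 (x := v) (by rw [hkeys4, hkeys3, hkeys2]; exact hvmem)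
    exact this
  have hmu_mem : m2 u ∈ comp2.keys := by
    have := good_m_mem hg4 (x := u) (by rw [hkeys4']; exact humem)
    rwa [hkeys4'] at this
  have hmv_mem : m2 v ∈ comp2.keys := by
    have := good_m_mem hg4 (x := v) (by rw [hkeys4']; exact hvmem)
    rwa [hkeys4'] at this
  have hbeq : bstep comp u v = (if cu ≠ cv then
      comp2.keys.foldl (fun c x => if c.getD x 0 = cu then c.insert x cv else c) comp2
    else comp2) := by
    rw [bstep]
  by_cases hcc : cu = cv
  · rw [hbeq, if_neg (by simp [hcc]), hufeq, ← hcu2', ← hcv2', ← hcc]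
    rw [insert_par_self (hkeys4' ▸ hnd2) (hkeys4' ▸ (hcu2' ▸ hmu_mem)) (hcu2' ▸ hpar_u)]
    exact ⟨hkeys4', hnd2, hg4⟩
  · obtain ⟨hkf, hvf⟩ := relabel_fold cu cv comp2.keys comp2 hnd2 (fun x hx => hx)
    rw [hbeq, if_pos hcc, hufeq]
    set comp3 := comp2.keys.foldl (fun c x => if c.getD x 0 = cu then c.insert x cv else c) comp2 with hcomp3
    have hne : m2 u ≠ m2 v := by rw [← hcu2', ← hcv2']; exact hcc
    have hkeys5 : (uf4.insert (m2 u) (m2 v)).keys = uf4.keys :=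
      PySem.Dict.keys_insert_of_contains _ _
        ((PySem.Dict.contains_iff_mem_keys _ _).2 (hkeys4' ▸ hmu_mem))
    refine ⟨by rw [hkeys5, hkeys4', hkf], by rw [hkf]; exact hnd2, ?_⟩
    intro x hx
    rw [hkeys5, hkeys4'] at hx
    obtain ⟨lx, hcx, hndx, hsubx⟩ := hg4 x (hkeys4' ▸ hx)
    obtain ⟨l', hc', hnd', hsub'⟩ := chain_update_union
      (uf' := uf4.insert (m2 u) (m2 v)) (ra := m2 u) (rb := m2 v)
      (fun y hy => by rw [par_insert]; exact if_neg hy)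
      (by rw [par_insert, if_pos rfl]) hpar_u hpar_v hne hcx hndx
    have hval : comp3.getD x 0 = if m2 x = m2 u then m2 v else m2 x := by
      rw [hcomp3, hvf x, hcu2', hcv2']
      simp only [hm2]
      simp [hx]
    refine ⟨l', ?_, hnd', ?_⟩
    · show Chain _ x (comp3.getD x 0) l'
      rw [hval]
      exact hc'
    intro y hy
    rw [hkeys5, hkeys4']
    rcases hsub' y hy with hh | hh
    · exact hkeys4' ▸ hsubx y hh
    · exact hh ▸ hmv_mem
theorem phase1 (graph : List (Int × List Int)) :
    INV (graph.foldl (fun uf p => p.2.foldl (fun uf v => ufUnion uf p.1 v) uf) PySem.Dict.empty)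
        (graph.foldl (fun comp p => p.2.foldl (fun comp v => bstep comp p.1 v) comp) PySem.Dict.empty) := by
  have hstep : ∀ s t (p : Int × List Int), INV s t →
      INV (p.2.foldl (fun uf v => ufUnion uf p.1 v) s) (p.2.foldl (fun comp v => bstep comp p.1 v) t) :=
    fun s t p hst => foldl_rel (R := INV) (f := fun uf v => ufUnion uf p.1 v)
      (g := fun c v => bstep c p.1 v) (fun s t x h => edge_step p.1 x h) p.2 s t hst
  have hbase : INV PySem.Dict.empty PySem.Dict.empty :=
    ⟨rfl, PySem.Dict.nodup_keys_empty, fun x hx => absurd hx (by simp [PySem.Dict.keys_empty])⟩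
  exact foldl_rel (R := INV) (f := fun uf p => p.2.foldl (fun uf v => ufUnion uf p.1 v) uf)
    (g := fun comp p => p.2.foldl (fun comp v => bstep comp p.1 v) comp) hstep graph _ _ hbase

theorem count_loop (m : Int → Int) :
    ∀ (ks : List Int) (uf count : PySem.Dict Int Int), Good uf m → (∀ u ∈ ks, u ∈ uf.keys) →
    (ks.foldl countStep (uf, count)).1.keys = uf.keys ∧
    Good (ks.foldl countStep (uf, count)).1 m ∧
    (ks.foldl countStep (uf, count)).2 =
    ks.foldl (fun c u => c.insert (m u) (c.getD (m u) 0 + 1)) count := by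
  intro ks
  induction ks with
  | nil => intro uf count hgood _; exact ⟨rfl, hgood, rfl⟩
  | cons u ks ih =>
    intro uf count hg hsub
    have hu : u ∈ uf.keys := hsub u (by simp)
    obtain ⟨uf3, hf3, hk3, hg3⟩ := ufFind_call hg hu
    by_cases hcon : count.contains (m u) = false
    · obtain ⟨uf4, hf4, hk4, hg4⟩ := ufFind_call hg3 (a := u) (hk3 ▸ hu)
      obtain ⟨uf5, hf5, hk5, hg5⟩ := ufFind_call (uf := uf4)
        (m := m) hg4 (a := u) (hk4 ▸ hk3 ▸ hu)
      have hstep : countStep (uf, count) u = (uf5, count.insert (m u) (count.getD (m u) 0 + 1)) := by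
        simp only [countStep, hf3, hcon, if_true, hf4, hf5]
        rw [PySem.Dict.getD_insert_self, PySem.Dict.insert_insert_self,
          PySem.Dict.getD_of_not_contains _ _ hcon]
      rw [List.foldl_cons] at *
      rw [hstep]
      obtain ⟨ihk, ihg, ihv⟩ := ih uf5 _ hg5 (fun z hz => by rw [hk5, hk4, hk3]; exact hsub z (by simp [hz]))
      exact ⟨by rw [ihk, hk5, hk4, hk3], ihg, ihv⟩
    · obtain ⟨uf4, hf4, hk4, hg4⟩ := ufFind_call hg3 (a := u) (hk3 ▸ hu)
      have hstep : countStep (uf, count) u = (uf4, count.insert (m u) (count.getD (m u) 0 + 1)) := by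
        simp only [countStep, hf3]
        simp [hcon]
        simp [hf4]
      rw [List.foldl_cons] at *
      rw [hstep]
      obtain ⟨ihk, ihg, ihv⟩ := ih uf4 _ hg4 (fun z hz => by rw [hk4, hk3]; exact hsub z (by simp [hz]))
      exact ⟨by rw [ihk, hk4, hk3], ihg, ihv⟩
def MB (mm : Int × Int) (bb : Option Int × Int) : Prop :=
  bb.2 = mm.1 ∧ 0 ≤ mm.1 ∧ ((bb.1 = none ∧ mm.1 = 0) ∨ (bb.1 = some mm.2 ∧ 0 < mm.1))

theorem max_loop : ∀ (items : List (Int × Int)) (mm : Int × Int) (bb : Option Int × Int),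
    MB mm bb →
    MB (items.foldl (fun (mm : Int × Int) p => if p.2 > mm.1 then (p.2, p.1) else mm) mm)
       (items.foldl (fun (bb : Option Int × Int) p => if p.2 > bb.2 then (some p.1, p.2) else bb) bb) := by
  intro items
  induction items with
  | nil => intro mm bb h; exact h
  | cons p items ih =>
    intro mm bb h
    obtain ⟨h1, h2, h3⟩ := h
    rw [List.foldl_cons, List.foldl_cons]
    by_cases hc : p.2 > mm.1
    · rw [if_pos hc, if_pos (h1 ▸ hc)]
      exact ih _ _ ⟨rfl, le_of_lt (lt_of_le_of_lt h2 hc), Or.inr ⟨rfl, lt_of_le_of_lt h2 hc⟩⟩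
    · rw [if_neg hc, if_neg (h1 ▸ hc)]
      exact ih _ _ ⟨h1, h2, h3⟩

theorem max_mono : ∀ (items : List (Int × Int)) (mm : Int × Int),
    mm.1 ≤ (items.foldl (fun (mm : Int × Int) p => if p.2 > mm.1 then (p.2, p.1) else mm) mm).1 := by
  intro items
  induction items with
  | nil => intro mm; exact le_refl _
  | cons p items ih =>
    intro mm
    rw [List.foldl_cons]
    by_cases hc : p.2 > mm.1
    · rw [if_pos hc]
      exact le_trans (le_of_lt hc) (by simpa using ih (p.2, p.1))
    · rw [if_neg hc]
      exact ih mm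

theorem relabel_loop (m : Int → Int) (mxi : Int) :
    ∀ (ks : List Int) (uf rel : PySem.Dict Int Int), Good uf m → (∀ u ∈ ks, u ∈ uf.keys) →
    (ks.foldl (relStep mxi) (uf, rel)).2 =
    ks.foldl (fun rel u => if m u = mxi then rel.insert u (rel.items.length : Int) else rel) rel := by
  intro ks
  induction ks with
  | nil => intro uf rel _ _; rfl
  | cons u ks ih =>
    intro uf rel hg hsub
    have hu : u ∈ uf.keys := hsub u (by simp)
    obtain ⟨uf3, hf3, hk3, hg3⟩ := ufFind_call hg hu
    rw [List.foldl_cons, List.foldl_cons]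
    have hstep : relStep mxi (uf, rel) u =
        (uf3, if m u = mxi then rel.insert u (rel.items.length : Int) else rel) := by
      simp only [relStep, hf3]
      by_cases hc : m u = mxi
      · rw [if_pos hc, if_pos hc]
      · rw [if_neg hc, if_neg hc]
    rw [hstep]
    by_cases hc : m u = mxi
    · rw [if_pos hc]
      exact ih uf3 _ hg3 (fun z hz => hk3 ▸ hsub z (by simp [hz]))
    · rw [if_neg hc]
      exact ih uf3 _ hg3 (fun z hz => hk3 ▸ hsub z (by simp [hz]))

theorem relabel_keys_nodup (m : Int → Int) (mxi : Int) :
    ∀ (ks : List Int) (rel : PySem.Dict Int Int), rel.keys.Nodup →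
    (ks.foldl (fun rel u => if m u = mxi then rel.insert u (rel.items.length : Int) else rel) rel).keys.Nodup := by
  intro ks
  induction ks with
  | nil => intro rel h; exact h
  | cons u ks ih =>
    intro rel h
    rw [List.foldl_cons]
    by_cases hc : m u = mxi
    · rw [if_pos hc]
      exact ih _ (PySem.Dict.nodup_keys_insert _ _ _ h)
    · rw [if_neg hc]
      exact ih _ h

theorem build_inner (R : PySem.Dict Int Int) (lu : Int) (adj : List Int) :
    ∀ (gp : PySem.Dict Int (List Int)) (acc : List Int),
    adj.foldl (fun gp2 v => if R.contains v then gp2.modify lu [] (fun l => l ++ [R.getD v 0]) else gp2)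
      (gp.insert lu acc)
    = gp.insert lu (acc ++ adj.filterMap (fun v => R.get? v)) := by
  induction adj with
  | nil => intro gp acc; simp
  | cons v adj ih =>
    intro gp acc
    rw [List.foldl_cons]
    cases hv : R.get? v with
    | none =>
      have hcon : R.contains v = false := by
        rw [PySem.Dict.contains_eq_isSome_get?, hv]; rfl
      rw [if_neg (by simp [hcon]), ih gp acc]
      simp [hv]
    | some lv =>
      have hcon : R.contains v = true := by
        rw [PySem.Dict.contains_eq_isSome_get?, hv]; rfl
      have hgd : R.getD v 0 = lv := PySem.Dict.getD_of_get?_eq_some _ 0 hv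
      rw [if_pos hcon]
      have hmod : (gp.insert lu acc).modify lu [] (fun l => l ++ [R.getD v 0])
          = gp.insert lu (acc ++ [lv]) := by
        rw [hgd]
        have : ((gp.insert lu acc).modify lu [] (fun l => l ++ [lv]))
            = (gp.insert lu acc).insert lu (((gp.insert lu acc).getD lu []) ++ [lv]) := rfl
        rw [this, PySem.Dict.getD_insert_self, PySem.Dict.insert_insert_self]
      rw [hmod, ih gp (acc ++ [lv])]
      simp [hv]
theorem assemble (g : PySem.Dict Int (List Int)) (uf comp : PySem.Dict Int Int)
    (hkeys : uf.keys = comp.keys) (hnd : comp.keys.Nodup)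
    (hg : Good uf (fun x => comp.getD x 0)) :
    lccCore g uf = lccAltCore g comp := by
  simp only [lccCore, lccAltCore]
  set m : Int → Int := fun x => comp.getD x 0 with hm
  obtain ⟨hck, hcg, hcv⟩ := count_loop m comp.keys uf PySem.Dict.empty hg
    (fun u hu => hkeys.symm ▸ hu)
  have hcounter : comp.keys.foldl (fun c u => c.insert (m u) (c.getD (m u) 0 + 1)) PySem.Dict.empty
      = PySem.Dict.counter (comp.keys.map m) := by
    rw [← PySem.Dict.foldl_insert_getD_add_one_eq_counter, List.foldl_map]
  have hitems : comp.items = comp.keys.map (fun k => (k, m k)) :=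
    PySem.Dict.items_eq_map_keys comp hnd 0
  rw [hkeys, hcv]
  simp only [hitems, List.foldl_map]
  rw [hcounter]
  set C := PySem.Dict.counter (comp.keys.map m) with hC
  set mm := C.items.foldl (fun (mm : Int × Int) p => if p.2 > mm.1 then (p.2, p.1) else mm) (0, -1) with hmm
  set bb := C.items.foldl (fun (bb : Option Int × Int) p => if p.2 > bb.2 then (some p.1, p.2) else bb) (none, 0) with hbb
  have hMB : MB mm bb := max_loop C.items (0, -1) (none, 0) ⟨rfl, le_refl 0, Or.inl ⟨rfl, rfl⟩⟩
  -- A's relabel loop, stripped of the union-find state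
  have hrel := relabel_loop m mm.2 comp.keys (comp.keys.foldl countStep (uf, PySem.Dict.empty)).1
    PySem.Dict.empty hcg (fun u hu => by rw [hck, hkeys]; exact hu)
  rw [hrel]
  -- the two relabel folds agree
  have hRR : comp.keys.foldl (fun rel u => if m u = mm.2 then rel.insert u (rel.items.length : Int) else rel) PySem.Dict.empty
      = comp.keys.foldl (fun rel (u : Int) => if some (m u) = bb.1 then rel.insert u (rel.items.length : Int) else rel) PySem.Dict.empty := by
    apply PySem.List.foldl_congr_mem
    intro acc u hu
    have hpos : 0 < mm.1 := by
      have hmem : m u ∈ comp.keys.map m := List.mem_map_of_mem hu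
      have hCmem : m u ∈ PySem.Set.ofList (comp.keys.map m) :=
        (PySem.Set.mem_ofList _ _).2 hmem
      have hitemsne : C.items ≠ [] := by
        rw [hC, PySem.Dict.items_counter]
        intro h
        rw [List.map_eq_nil_iff] at h
        rw [h] at hCmem
        simp at hCmem
      obtain ⟨p0, rest, hsplit⟩ := List.exists_cons_of_ne_nil hitemsne
      have hp0 : 1 ≤ p0.2 := by
        have hp0mem : p0 ∈ C.items := by rw [hsplit]; simp
        rw [hC, PySem.Dict.items_counter] at hp0mem
        obtain ⟨k, hk, hkeq⟩ := List.mem_map.1 hp0mem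
        have hkm : k ∈ comp.keys.map m := (PySem.Set.mem_ofList _ _).1 hk
        have hcnt : 0 < List.count k (comp.keys.map m) := List.count_pos_iff.2 hkm
        rw [← hkeq]
        simp only
        omega
      rw [hmm, hsplit, List.foldl_cons]
      have h1 : (1:Int) ≤ (if p0.2 > (0 : Int) then (p0.2, p0.1) else ((0 : Int), (-1 : Int))).1 := by
        rw [if_pos (by omega)]
        exact hp0
      calc (0:Int) < (if p0.2 > (0:Int) then (p0.2, p0.1) else ((0:Int), (-1:Int))).1 := by omega
        _ ≤ _ := max_mono rest _
    have hsome : bb.1 = some mm.2 := by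
      rcases hMB.2.2 with ⟨_, h0⟩ | ⟨hs, _⟩
      · omega
      · exact hs
    rw [hsome]
    by_cases hc : m u = mm.2
    · rw [if_pos hc, if_pos (by rw [hc])]
    · rw [if_neg hc, if_neg (by simp [hc])]
  rw [← hRR]
  set R := comp.keys.foldl (fun rel u => if m u = mm.2 then rel.insert u (rel.items.length : Int) else rel) PySem.Dict.empty with hR
  have hndR : R.keys.Nodup := relabel_keys_nodup m mm.2 comp.keys PySem.Dict.empty PySem.Dict.nodup_keys_empty
  -- the two output folds agree
  have hout : R.items.foldl (buildStep g R) PySem.Dict.empty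
      = R.items.foldl (fun o (p : Int × Int) =>
          match g.get? p.1 with
          | some adj => o.insert p.2 (adj.filterMap (fun v => R.get? v))
          | none => o) PySem.Dict.empty := by
    apply PySem.List.foldl_congr_mem
    intro gp p hp
    cases hgp : g.get? p.1 with
    | none =>
      have hcon : g.contains p.1 = false := by
        rw [PySem.Dict.contains_eq_isSome_get?, hgp]; rfl
      rw [buildStep, if_neg (by simp [hcon])]
    | some adj =>
      have hcon : g.contains p.1 = true := by
        rw [PySem.Dict.contains_eq_isSome_get?, hgp]; rfl
      have hgd : g.getD p.1 [] = adj := PySem.Dict.getD_of_get?_eq_some _ [] hgp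
      have hpv : R.getD p.1 0 = p.2 := PySem.Dict.getD_of_mem_items _ hp hndR 0
      rw [buildStep, if_pos hcon]
      simp only [hgd, hpv]
      rw [build_inner R p.2 adj gp []]
      simp
  rw [hout]

theorem lcc_eq_alt (graph : List (Int × List Int)) : lcc graph = lcc_alt graph := by
  obtain ⟨hkeys, hnd, hg⟩ := phase1 graph
  exact assemble (PySem.Dict.mk graph) _ _ hkeys hnd hg

-- ===== VERDICT (by name: the statement is the Claim_ definition above) =====
theorem lcc_spec : Claim_equal_lcc := by
  intro graph _
  show lcc graph = lcc_alt graph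
  exact lcc_eq_alt graph
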